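-- pv_equiv track=rewrite | github.com/live-in-the-moment/SparkFlow | sparkflow/rules/topology_rules.py | _component_has_duplicate_net
-- ===== SOURCE A (Python) =====
-- def _component_has_duplicate_net(terminal_ids: tuple[str, ...], terminal_to_net: dict[str, str]) -> bool:
--     seen: set[str] = set()
--     for terminal_id in terminal_ids:
--         net_id = terminal_to_net.get(terminal_id)
--         if net_id is None:
--             continue
--         if net_id in seen:
--             return True
--         seen.add(net_id)
--     return False
-- ===== SOURCE B (Python) =====
-- def _component_has_duplicate_net(terminal_ids, terminal_to_net):
--     nets = sorted(terminal_to_net[t] for t in terminal_ids if t in terminal_to_net)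
--     return any(x == y for x, y in zip(nets, nets[1:]))
-- ===== Notes on version B (the rewrite author's own statement) =====
-- stated objective: alternative
-- what changed: Replaces A's online hash-set with early exit by a sort-based algorithm: collect the mapped net ids, sort them, and report a duplicate iff some adjacent pair in the sorted list is equal (no set structure at all).
import Mathlib
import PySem

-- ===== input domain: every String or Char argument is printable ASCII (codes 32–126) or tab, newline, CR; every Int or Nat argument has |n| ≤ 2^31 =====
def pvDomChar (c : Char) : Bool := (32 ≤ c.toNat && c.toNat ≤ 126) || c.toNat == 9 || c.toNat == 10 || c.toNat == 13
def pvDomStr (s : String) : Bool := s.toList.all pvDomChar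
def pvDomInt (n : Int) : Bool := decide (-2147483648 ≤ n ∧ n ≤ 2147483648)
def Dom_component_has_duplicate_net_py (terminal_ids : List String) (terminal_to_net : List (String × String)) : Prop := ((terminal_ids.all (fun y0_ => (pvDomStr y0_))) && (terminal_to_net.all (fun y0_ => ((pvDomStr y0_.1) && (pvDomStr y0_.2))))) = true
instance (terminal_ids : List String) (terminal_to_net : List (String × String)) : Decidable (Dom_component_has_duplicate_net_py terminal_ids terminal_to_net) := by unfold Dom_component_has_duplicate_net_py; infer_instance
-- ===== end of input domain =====

-- B replaces A's online hash-set with early exit by a sort-based algorithm: collect the mapped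
-- net ids, sort them, and report a duplicate iff some adjacent sorted pair is equal; alternative.

-- ===== PORT A =====
-- the 'for' loop of A with its 'seen' set and early 'return True'
def chdnLoopA (terminal_ids : List String) (terminal_to_net : List (String × String))
    (seen : PySem.Set String) : Bool :=
  match terminal_ids with
  | [] => false
  | t :: rest =>
    match PySem.Dict.get? (PySem.Dict.mk terminal_to_net) t with
    | none => chdnLoopA rest terminal_to_net seen          -- continue
    | some netId =>
      if PySem.Set.contains seen netId then true           -- return True
      else chdnLoopA rest terminal_to_net (PySem.Set.add seen netId)

def component_has_duplicate_net_py (terminal_ids : List String) (terminal_to_net : List (String × String)) : Bool :=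
  chdnLoopA terminal_ids terminal_to_net PySem.Set.empty

-- ===== PORT B =====
-- any(x == y for x, y in zip(nets, nets[1:])) : scan adjacent pairs
def chdnAdjDup : List String → Bool
  | a :: b :: rest => a == b || chdnAdjDup (b :: rest)
  | _ => false

def component_has_duplicate_net_py_alt (terminal_ids : List String) (terminal_to_net : List (String × String)) : Bool :=
  let nets := PySem.List.sorted
    (terminal_ids.filterMap (fun t => PySem.Dict.get? (PySem.Dict.mk terminal_to_net) t))
    (fun x => x) false
  chdnAdjDup nets

-- ===== PRECONDITION & SPEC =====
def Spec_component_has_duplicate_net_py (terminal_ids : List String) (terminal_to_net : List (String × String)) (out : Bool) : Prop := out = component_has_duplicate_net_py_alt terminal_ids terminal_to_net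
instance (terminal_ids : List String) (terminal_to_net : List (String × String)) (out : Bool) : Decidable (Spec_component_has_duplicate_net_py terminal_ids terminal_to_net out) := by unfold Spec_component_has_duplicate_net_py; infer_instance

-- ===== CLAIM =====
def Claim_equal_component_has_duplicate_net_py : Prop := ∀ (terminal_ids : List String) (terminal_to_net : List (String × String)), Dom_component_has_duplicate_net_py terminal_ids terminal_to_net → Spec_component_has_duplicate_net_py terminal_ids terminal_to_net (component_has_duplicate_net_py terminal_ids terminal_to_net)

-- ===== LEMMAS AND PROOFS =====

theorem set_add_of_not_mem {x : String} {s : PySem.Set String} (hmem : x ∉ s) :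
    PySem.Set.add s x = s ++ [x] := by
  have hc : PySem.Set.contains s x = false := by
    rw [Bool.eq_false_iff]; intro h; exact hmem ((PySem.Set.contains_iff _ _).1 h)
  unfold PySem.Set.add; rw [hc]; simp

-- A's loop decides whether 'seen ++ mapped net ids' contains a repetition
theorem chdnLoopA_eq_loopNets (terminal_ids : List String) (terminal_to_net : List (String × String))
    (seen : PySem.Set String) (hseen : seen.Nodup) :
    chdnLoopA terminal_ids terminal_to_net seen =
      decide (¬ (seen ++ terminal_ids.filterMap (fun t => PySem.Dict.get? (PySem.Dict.mk terminal_to_net) t)).Nodup) := by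
  induction terminal_ids generalizing seen with
  | nil => simp [chdnLoopA, hseen]
  | cons t rest ih =>
    cases hg : PySem.Dict.get? (PySem.Dict.mk terminal_to_net) t with
    | none =>
      simp only [chdnLoopA, List.filterMap_cons, hg]
      exact ih seen hseen
    | some netId =>
      simp only [chdnLoopA, List.filterMap_cons, hg]
      by_cases hmem : netId ∈ seen
      · have hc : PySem.Set.contains seen netId = true := (PySem.Set.contains_iff _ _).2 hmem
        rw [hc]
        simp only [if_true]
        have : ¬ (seen ++ netId :: rest.filterMap (fun t => PySem.Dict.get? (PySem.Dict.mk terminal_to_net) t)).Nodup := by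
          intro hnd
          exact (List.disjoint_of_nodup_append hnd) hmem (by simp)
        simp [this]
      · have hc : PySem.Set.contains seen netId = false := by
          rw [Bool.eq_false_iff]
          intro h; exact hmem ((PySem.Set.contains_iff _ _).1 h)
        rw [hc]
        simp only [if_false, Bool.false_eq_true]
        rw [ih _ (PySem.Set.nodup_add _ _ hseen)]
        rw [set_add_of_not_mem hmem]
        simp [List.append_assoc]

-- on a ≤-sorted list, an adjacent repetition is exactly a repetition
theorem chdnAdjDup_sorted (l : List String) (hp : l.Pairwise (· ≤ ·)) :
    chdnAdjDup l = decide (¬ l.Nodup) := by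
  induction l with
  | nil => simp [chdnAdjDup]
  | cons a t ih =>
    cases t with
    | nil => simp [chdnAdjDup]
    | cons b rest =>
      have hab : a ≤ b := (List.pairwise_cons.1 hp).1 b (by simp)
      have htail : (b :: rest).Pairwise (· ≤ ·) := (List.pairwise_cons.1 hp).2
      by_cases he : a = b
      · subst he
        have : ¬ (a :: a :: rest).Nodup := by simp
        simp [chdnAdjDup, this]
      · have hnm : a ∉ b :: rest := by
          intro hm
          rcases List.mem_cons.1 hm with h | h
          · exact he h
          · have hbx : b ≤ a := (List.pairwise_cons.1 htail).1 a h
            exact he (le_antisymm hab hbx)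
        have hbe : (a == b) = false := by simp [he]
        simp only [chdnAdjDup, hbe, Bool.false_or]
        rw [ih htail]
        simp [List.nodup_cons, hnm]

-- ===== VERDICT =====
theorem component_has_duplicate_net_py_spec : Claim_equal_component_has_duplicate_net_py := by
  intro terminal_ids terminal_to_net _
  unfold Spec_component_has_duplicate_net_py component_has_duplicate_net_py component_has_duplicate_net_py_alt
  rw [chdnLoopA_eq_loopNets _ _ PySem.Set.empty List.nodup_nil]
  rw [show (PySem.Set.empty : PySem.Set String) = [] from rfl, List.nil_append]
  set nets := terminal_ids.filterMap (fun t => PySem.Dict.get? (PySem.Dict.mk terminal_to_net) t) with hn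
  have hperm : (PySem.List.sorted nets (fun x => x) false).Perm nets := PySem.List.sorted_perm _ _ _
  have hpw : (PySem.List.sorted nets (fun x => x) false).Pairwise (fun a b => a ≤ b) := by
    simpa using PySem.List.sorted_pairwise nets (fun x => x)
  rw [chdnAdjDup_sorted _ hpw]
  simp [decide_eq_decide, hperm.nodup_iff]
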